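-- pv_equiv track=rewrite | github.com/pranesh-S-S/AI-Adaptive-Onboarding-Engine | AI-Adaptive-Onboarding-Engine/backend/adaptive.py | merge_llm_results
-- ===== SOURCE A (Python) =====
-- def merge_llm_results(results: list) -> dict:
--     merged = {}
--     for result in results:
--         if not result:
--             continue
--         for skill, data in result.get("skills", {}).items():
--             if skill not in merged:
--                 merged[skill] = data
--             else:
--                 if len(data.get("reason", "")) > len(merged[skill].get("reason", "")):
--                     merged[skill] = data
--     return {"skills": merged}
-- ===== SOURCE B (Python) =====
-- def merge_llm_results(results: list) -> dict:
--     # Pass 1: group every candidate data per skill, in encounter order.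
--     groups = {}
--     for result in results:
--         if not result:
--             continue
--         for skill, data in result.get("skills", {}).items():
--             groups[skill] = groups.get(skill, []) + [data]
--     # Pass 2: per skill pick the candidate with the longest reason
--     # (max returns the first maximal element on a tie).
--     merged = {skill: max(cands, key=lambda d: len(d.get("reason", "")))
--               for skill, cands in groups.items()}
--     return {"skills": merged}
-- ===== Notes on version B (the rewrite author's own statement) =====
-- stated objective: alternative
-- what changed: Replaces A's single-pass online update of the merged dict with a two-phase group-then-reduce: first group every candidate per skill into a dict of lists in encounter order, then pick each skill's winner with max keyed by reason length (first maximal on ties).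
import Mathlib
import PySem

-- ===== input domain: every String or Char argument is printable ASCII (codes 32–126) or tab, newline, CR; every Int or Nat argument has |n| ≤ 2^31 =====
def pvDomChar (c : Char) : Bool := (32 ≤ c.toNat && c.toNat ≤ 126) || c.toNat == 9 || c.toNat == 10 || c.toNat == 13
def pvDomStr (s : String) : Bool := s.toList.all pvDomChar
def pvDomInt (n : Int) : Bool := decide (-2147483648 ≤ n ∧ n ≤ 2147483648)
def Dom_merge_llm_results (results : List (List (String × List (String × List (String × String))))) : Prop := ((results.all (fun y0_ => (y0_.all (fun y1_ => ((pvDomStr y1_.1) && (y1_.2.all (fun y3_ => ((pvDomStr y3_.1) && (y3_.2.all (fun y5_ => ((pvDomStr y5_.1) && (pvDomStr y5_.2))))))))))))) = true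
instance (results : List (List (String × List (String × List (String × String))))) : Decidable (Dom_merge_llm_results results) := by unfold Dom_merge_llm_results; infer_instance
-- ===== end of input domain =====

-- B merges in two passes (group candidates per skill, then reduce each group with
-- max by reason length) instead of A's single online-update loop; objective: alternative.

-- ===== PORT A =====
-- one step of A's inner loop: the body of 'for skill, data in …'
def mergeStepA (merged : PySem.Dict String (List (String × String)))
    (p : String × List (String × String)) : PySem.Dict String (List (String × String)) :=
  if merged.contains p.1 = false then merged.insert p.1 p.2
  else if PySem.Str.len ((PySem.Dict.mk p.2).getD "reason" "") >
          PySem.Str.len ((PySem.Dict.mk (merged.getD p.1 [])).getD "reason" "") then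
    merged.insert p.1 p.2
  else merged

def merge_llm_results (results : List (List (String × List (String × List (String × String))))) : List (String × List (String × List (String × String))) :=
  let merged := results.foldl
    (fun merged result =>
      if result = [] then merged
      else ((PySem.Dict.mk result).getD "skills" []).foldl mergeStepA merged)
    PySem.Dict.empty
  [("skills", merged.items)]

-- ===== PORT B =====
-- exact port of python's max(cands, key=lambda d: len(d.get("reason", ""))):
-- first maximal element; [] is never reached (groups hold nonempty lists)
def pyMaxByReason (cands : List (List (String × String))) : List (String × String) :=
  match cands with
  | [] => []
  | c :: rest => rest.foldl
      (fun best d =>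
        if PySem.Str.len ((PySem.Dict.mk d).getD "reason" "") >
           PySem.Str.len ((PySem.Dict.mk best).getD "reason" "") then d else best) c

def merge_llm_results_alt (results : List (List (String × List (String × List (String × String))))) : List (String × List (String × List (String × String))) :=
  let groups := results.foldl
    (fun groups result =>
      if result = [] then groups
      else ((PySem.Dict.mk result).getD "skills" []).foldl
        (fun (groups : PySem.Dict String (List (List (String × String)))) p =>
          groups.modify p.1 [] (· ++ [p.2])) groups)
    PySem.Dict.empty
  [("skills", groups.items.map (fun g => (g.1, pyMaxByReason g.2)))]

-- ===== PRECONDITION & SPEC =====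
def Spec_merge_llm_results (results : List (List (String × List (String × List (String × String))))) (out : List (String × List (String × List (String × String)))) : Prop := out = merge_llm_results_alt results
instance (results : List (List (String × List (String × List (String × String))))) (out : List (String × List (String × List (String × String)))) : Decidable (Spec_merge_llm_results results out) := by unfold Spec_merge_llm_results; infer_instance

-- ===== CLAIM (what is proved, stated in full; the proofs are below) =====
def Claim_equal_merge_llm_results : Prop := ∀ (results : List (List (String × List (String × List (String × String))))), Dom_merge_llm_results results → Spec_merge_llm_results results (merge_llm_results results)

-- ===== LEMMAS AND PROOFS =====

-- the invariant tying A's running 'merged' to B's running 'groups'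
def MergeInv (m : PySem.Dict String (List (String × String)))
    (g : PySem.Dict String (List (List (String × String)))) : Prop :=
  g.keys.Nodup ∧ m.keys = g.keys ∧
  ∀ k ∈ g.keys, g.getD k [] ≠ [] ∧ m.getD k [] = pyMaxByReason (g.getD k [])

theorem pyMaxByReason_append (xs : List (List (String × String))) (d : List (String × String)) :
    pyMaxByReason (xs ++ [d]) =
      if xs = [] then d
      else if PySem.Str.len ((PySem.Dict.mk d).getD "reason" "") >
              PySem.Str.len ((PySem.Dict.mk (pyMaxByReason xs)).getD "reason" "") then d
      else pyMaxByReason xs := by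
  cases xs with
  | nil => simp [pyMaxByReason]
  | cons c rest => simp [pyMaxByReason, List.foldl_append]

theorem mergeInv_empty : MergeInv PySem.Dict.empty PySem.Dict.empty := by
  refine ⟨by simp [PySem.Dict.empty, PySem.Dict.keys], by rfl, ?_⟩
  intro k hk
  simp [PySem.Dict.empty, PySem.Dict.keys] at hk

theorem mergeInv_step (m : PySem.Dict String (List (String × String)))
    (g : PySem.Dict String (List (List (String × String))))
    (p : String × List (String × String))
    (h : MergeInv m g) :
    MergeInv (mergeStepA m p) (g.modify p.1 [] (· ++ [p.2])) := by
  obtain ⟨hnd, hkeys, hvals⟩ := h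
  obtain ⟨k0, d0⟩ := p
  have hcon : ∀ k, m.contains k = g.contains k := by
    intro k
    rw [PySem.Dict.contains_eq_decide_mem_keys, PySem.Dict.contains_eq_decide_mem_keys, hkeys]
  by_cases hc : g.contains k0 = true
  · -- k0 already present in both
    have hmc : m.contains k0 = true := by rw [hcon]; exact hc
    have hk0 : k0 ∈ g.keys := (PySem.Dict.contains_iff_mem_keys g k0).mp hc
    have hgk : (g.modify k0 [] (· ++ [d0])).keys = g.keys := by
      rw [PySem.Dict.keys_modify, PySem.Dict.keys_insert_of_contains _ _ hc]
    have hold := hvals k0 hk0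
    refine ⟨hgk ▸ hnd, ?_, ?_⟩
    · rw [hgk]
      unfold mergeStepA
      simp only [hmc, Bool.true_eq_false, reduceIte]
      split
      · rw [PySem.Dict.keys_insert_of_contains _ _ hmc]; exact hkeys
      · exact hkeys
    · intro k hk
      rw [hgk] at hk
      by_cases hkk : k = k0
      · subst hkk
        rw [PySem.Dict.getD_modify_self]
        constructor
        · simp
        · rw [pyMaxByReason_append, if_neg hold.1, ← hold.2]
          unfold mergeStepA
          simp only [hmc, Bool.true_eq_false, reduceIte]
          split
          · rw [PySem.Dict.getD_insert_self]
          · rfl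
      · rw [PySem.Dict.getD_modify_of_ne _ _ _ hkk]
        refine ⟨(hvals k hk).1, ?_⟩
        rw [← (hvals k hk).2]
        unfold mergeStepA
        simp only [hmc, Bool.true_eq_false, reduceIte]
        split
        · rw [PySem.Dict.getD_insert_of_ne _ _ _ hkk]
        · rfl
  · -- k0 fresh: both append it
    have hc' : g.contains k0 = false := by simpa using hc
    have hmc : m.contains k0 = false := by rw [hcon]; exact hc'
    have hk0 : k0 ∉ g.keys := fun hm => by
      rw [(PySem.Dict.contains_iff_mem_keys g k0).mpr hm] at hc'; cases hc'
    have hg0 : g.getD k0 [] = [] := PySem.Dict.getD_of_not_contains _ _ hc'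
    have hgk : (g.modify k0 [] (· ++ [d0])).keys = g.keys ++ [k0] := by
      rw [PySem.Dict.keys_modify, PySem.Dict.keys_insert_of_not_contains _ _ hc']
    have hm' : mergeStepA m (k0, d0) = m.insert k0 d0 := by
      unfold mergeStepA; simp [hmc]
    refine ⟨?_, ?_, ?_⟩
    · rw [hgk]
      rw [List.nodup_append]
      refine ⟨hnd, List.nodup_singleton _, ?_⟩
      intro a ha b hb h
      subst h
      exact hk0 (List.mem_singleton.mp hb ▸ ha)
    · rw [hgk, hm', PySem.Dict.keys_insert_of_not_contains _ _ hmc, hkeys]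
    · intro k hk
      rw [hgk] at hk
      rw [hm']
      by_cases hkk : k = k0
      · subst hkk
        rw [PySem.Dict.getD_modify_self, hg0, PySem.Dict.getD_insert_self]
        exact ⟨by simp, by simp [pyMaxByReason]⟩
      · have hk' : k ∈ g.keys := by
          rcases List.mem_append.mp hk with h1 | h1
          · exact h1
          · exact absurd (List.mem_singleton.mp h1) hkk
        rw [PySem.Dict.getD_modify_of_ne _ _ _ hkk,
          PySem.Dict.getD_insert_of_ne _ _ _ hkk]
        exact hvals k hk'

theorem mergeInv_foldl (l : List (String × List (String × String)))
    (m : PySem.Dict String (List (String × String)))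
    (g : PySem.Dict String (List (List (String × String))))
    (h : MergeInv m g) :
    MergeInv (l.foldl mergeStepA m)
      (l.foldl (fun g p => g.modify p.1 [] (· ++ [p.2])) g) := by
  induction l generalizing m g with
  | nil => exact h
  | cons p rest ih =>
    simp only [List.foldl_cons]
    exact ih _ _ (mergeInv_step m g p h)

theorem mergeInv_results_aux (results : List (List (String × List (String × List (String × String)))))
    (m : PySem.Dict String (List (String × String)))
    (g : PySem.Dict String (List (List (String × String))))
    (h : MergeInv m g) :
    MergeInv
      (results.foldl (fun merged result =>
        if result = [] then merged
        else ((PySem.Dict.mk result).getD "skills" []).foldl mergeStepA merged) m)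
      (results.foldl (fun groups result =>
        if result = [] then groups
        else ((PySem.Dict.mk result).getD "skills" []).foldl
          (fun g p => g.modify p.1 [] (· ++ [p.2])) groups) g) := by
  induction results generalizing m g with
  | nil => exact h
  | cons r rest ih =>
    simp only [List.foldl_cons]
    by_cases hr : r = []
    · simp only [if_pos hr]
      exact ih _ _ h
    · simp only [if_neg hr]
      exact ih _ _ (mergeInv_foldl _ _ _ h)

theorem mergeInv_results (results : List (List (String × List (String × List (String × String))))) :
    MergeInv
      (results.foldl (fun merged result =>
        if result = [] then merged
        else ((PySem.Dict.mk result).getD "skills" []).foldl mergeStepA merged) PySem.Dict.empty)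
      (results.foldl (fun groups result =>
        if result = [] then groups
        else ((PySem.Dict.mk result).getD "skills" []).foldl
          (fun g p => g.modify p.1 [] (· ++ [p.2])) groups) PySem.Dict.empty) :=
  mergeInv_results_aux results _ _ mergeInv_empty

theorem mergeInv_items (m : PySem.Dict String (List (String × String)))
    (g : PySem.Dict String (List (List (String × String))))
    (h : MergeInv m g) :
    m.items = g.items.map (fun q => (q.1, pyMaxByReason q.2)) := by
  obtain ⟨hnd, hkeys, hvals⟩ := h
  rw [PySem.Dict.items_eq_map_keys m (hkeys ▸ hnd) [],
    PySem.Dict.items_eq_map_keys g hnd [], hkeys, List.map_map]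
  refine List.map_congr_left fun k hk => ?_
  simp only [Function.comp_apply]
  exact Prod.ext rfl (hvals k hk).2

-- ===== VERDICT (by name: the statement is the Claim_ definition above) =====
theorem merge_llm_results_spec : Claim_equal_merge_llm_results := by
  intro results _
  have h := mergeInv_items _ _ (mergeInv_results results)
  unfold Spec_merge_llm_results merge_llm_results merge_llm_results_alt
  simp only [h]
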